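-- pv_equiv track=rewrite | github.com/Ragunath041/Python | OOPS/42_non_Vowel_palindrome.py | non_vow
-- ===== SOURCE A (Python) =====
-- def non_vow(s):
--     vowels = 'aeiou'
--     string = ''
--     for i in s:
--         if  i not in vowels:
--             string += i
--     # if string == self.str_rev(string):
--     if string == string[::-1]:
--         return 'YES'
--     else:
--         return 'NO'
-- ===== SOURCE B (Python) =====
-- def non_vow(s):
--     t = [c for c in s if c not in 'aeiou']
--     i, j = 0, len(t) - 1
--     while i < j:
--         if t[i] != t[j]:
--             return 'NO'
--         i += 1
--         j -= 1
--     return 'YES'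
-- ===== Notes on version B (the rewrite author's own statement) =====
-- stated objective: alternative
-- what changed: Instead of building the vowel-stripped string by repeated concatenation and comparing it with its slice-reversal, B filters once into a list and checks the palindrome with a two-pointer scan from both ends, with early exit on the first mismatch.
import Mathlib
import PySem

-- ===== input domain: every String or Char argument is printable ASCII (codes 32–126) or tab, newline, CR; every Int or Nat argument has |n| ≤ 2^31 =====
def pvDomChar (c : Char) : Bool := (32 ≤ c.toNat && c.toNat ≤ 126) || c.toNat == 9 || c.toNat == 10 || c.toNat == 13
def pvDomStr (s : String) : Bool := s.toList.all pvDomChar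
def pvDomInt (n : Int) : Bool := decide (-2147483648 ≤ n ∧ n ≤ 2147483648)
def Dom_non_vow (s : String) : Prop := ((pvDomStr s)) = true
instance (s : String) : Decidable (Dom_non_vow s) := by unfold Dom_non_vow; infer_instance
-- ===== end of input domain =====

-- B checks the palindrome with a two-pointer scan over the filtered list instead of
-- building the stripped string and comparing with its reversal (A).

-- ===== PORT A =====
def non_vow (s : String) : String :=
  let vowels : String := "aeiou"
  let string : List Char :=
    s.toList.foldl (fun acc c => if !(vowels.toList.contains c) then acc ++ [c] else acc) []
  if PySem.List.slice? string none none (-1) = some string then "YES" else "NO"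

-- ===== PORT B =====
-- the while loop of Source B, recursion on j - i
def tpLoop (t : List Char) (i j : Nat) : Bool :=
  if i < j then
    if t.getD i ' ' ≠ t.getD j ' ' then false
    else tpLoop t (i + 1) (j - 1)
  else true
termination_by j - i

def non_vow_alt (s : String) : String :=
  let t := s.toList.filter (fun c => !("aeiou".toList.contains c))
  if tpLoop t 0 (t.length - 1) then "YES" else "NO"

-- ===== PRECONDITION & SPEC =====
def Spec_non_vow (s : String) (out : String) : Prop := out = non_vow_alt s
instance (s : String) (out : String) : Decidable (Spec_non_vow s out) := by unfold Spec_non_vow; infer_instance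

-- ===== CLAIM (what is proved, stated in full; the proofs are below) =====
def Claim_equal_non_vow : Prop := ∀ (s : String), Dom_non_vow s → Spec_non_vow s (non_vow s)

-- ===== LEMMAS AND PROOFS =====

-- A's accumulation loop is a filter
lemma foldl_keep_filter (p : Char → Bool) :
    ∀ (l acc : List Char),
      l.foldl (fun acc c => if p c then acc ++ [c] else acc) acc = acc ++ l.filter p := by
  intro l
  induction l with
  | nil => intro acc; simp
  | cons c l ih =>
      intro acc
      by_cases h : p c = true <;> simp [List.foldl, h, ih]

-- two-pointer characterization (i + j stays constant through the recursion)
lemma tpLoop_iff (t : List Char) :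
    ∀ d i j, j - i = d →
      (tpLoop t i j = true ↔ ∀ k, i ≤ k → k ≤ j → t.getD k ' ' = t.getD (i + j - k) ' ') := by
  intro d
  induction d using Nat.strong_induction_on with
  | _ d ih =>
    intro i j hd
    rw [tpLoop]
    by_cases hij : i < j
    · simp only [hij, if_true]
      by_cases hne : t.getD i ' ' = t.getD j ' '
      · have hrec := ih (j - 1 - (i + 1)) (by omega) (i + 1) (j - 1) rfl
        simp only [hne, ne_eq, not_true_eq_false, if_false, hrec]
        constructor
        · intro h k hk1 hk2
          by_cases hki : k = i
          · rw [hki, show i + j - i = j by omega]; exact hne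
          · by_cases hkj : k = j
            · rw [hkj, show i + j - j = i by omega]; exact hne.symm
            · have := h k (by omega) (by omega)
              simpa [show i + 1 + (j - 1) - k = i + j - k by omega] using this
        · intro h k hk1 hk2
          have := h k (by omega) (by omega)
          simpa [show i + 1 + (j - 1) - k = i + j - k by omega] using this
      · simp only [hne, ne_eq, not_false_eq_true, if_true]
        constructor
        · intro h; exact absurd h (by simp)
        · intro h
          exact absurd (by simpa [show i + j - i = j by omega] using h i le_rfl (by omega)) hne
    · simp only [hij, if_false]
      constructor
      · intro _ k hk1 hk2
        have h1 : k = i := by omega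
        rw [show i + j - k = k by omega, h1]
      · intro _; trivial

-- palindromicity as the symmetric getD condition
lemma palin_iff (t : List Char) :
    (t.reverse = t) ↔ (∀ k, 0 ≤ k → k ≤ t.length - 1 → t.getD k ' ' = t.getD (t.length - 1 - k) ' ') := by
  rcases eq_or_ne t [] with rfl | hne
  · simp
  · have hn : 0 < t.length := List.length_pos_iff.mpr hne
    constructor
    · intro hrev k _ hk
      have hk' : k < t.length := by omega
      have hk'' : t.length - 1 - k < t.length := by omega
      rw [List.getD_eq_getElem t ' ' hk', List.getD_eq_getElem t ' ' hk'']
      have e1 : t.reverse[k]'(by simpa using hk') = t[t.length - 1 - k]'hk'' :=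
        List.getElem_reverse _
      have e2 : t.reverse[k]'(by simpa using hk') = t[k]'hk' :=
        List.getElem_of_eq hrev _
      exact e2.symm.trans e1
    · intro h
      apply List.ext_getElem (by simp)
      intro k hk1 hk2
      rw [List.getElem_reverse]
      have h1 := h k (by omega) (by omega)
      rw [List.getD_eq_getElem t ' ' hk2,
        List.getD_eq_getElem t ' ' (by omega : t.length - 1 - k < t.length)] at h1
      exact h1.symm

-- ===== VERDICT (by name: the statement is the Claim_ definition above) =====
theorem non_vow_spec : Claim_equal_non_vow := by
  intro s _
  unfold Spec_non_vow non_vow non_vow_alt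
  simp only [foldl_keep_filter, List.nil_append, PySem.List.slice?_none_none_neg_one,
    Option.some.injEq]
  set t := s.toList.filter (fun c => !("aeiou".toList.contains c)) with ht
  have hiff : (tpLoop t 0 (t.length - 1) = true) ↔ t.reverse = t := by
    refine (tpLoop_iff t _ 0 (t.length - 1) rfl).trans ?_
    simp only [Nat.zero_add]
    exact (palin_iff t).symm
  simp only [hiff]
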